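-- pv_equiv track=rewrite | github.com/ggerod/Code | PY/FB01b.py | getFirstHit
-- ===== SOURCE A (Python) =====
-- def bomb_location(x,y):
--     if ((x == 2) and (y in [1,2,3])): return True
--     return False
--
-- def getFirstHit(N):
--     i0=0
--     j=0
--     while (j < N):
--         i = i0
--         while (True):
--             if (bomb_location(i,j)): return((i,j))
--             i += 2
--             if (i >= N): break
--         i0 = ((i0 + 1) % 3)
--         j += 1
-- ===== SOURCE B (Python) =====
-- def getFirstHit(N):
--     # The scan hits the bomb row x=2 first at column j=2 (where i0 = 2),
--     # reachable exactly when N >= 3; otherwise the scan finds nothing.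
--     return (2, 2) if N >= 3 else None
-- ===== Notes on version B (the rewrite author's own statement) =====
-- stated objective: faster
-- what changed: Replaced the nested column/row scan with the closed form: the scan first hits the bomb at (2,2) exactly when N >= 3, else no hit.
import Mathlib
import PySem

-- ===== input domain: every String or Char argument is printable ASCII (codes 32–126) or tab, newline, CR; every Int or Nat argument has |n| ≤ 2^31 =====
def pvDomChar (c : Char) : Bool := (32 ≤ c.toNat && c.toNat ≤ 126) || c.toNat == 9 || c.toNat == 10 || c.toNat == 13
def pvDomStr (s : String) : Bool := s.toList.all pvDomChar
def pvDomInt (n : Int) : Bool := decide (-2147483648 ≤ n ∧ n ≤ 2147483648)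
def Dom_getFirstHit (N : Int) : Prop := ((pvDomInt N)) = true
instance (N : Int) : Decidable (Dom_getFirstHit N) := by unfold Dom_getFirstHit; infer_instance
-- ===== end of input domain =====

-- B replaces A's nested column/row scan by the closed form (2,2) iff N >= 3: asymptotically faster.


-- ===== PORT A =====
def bombLocation (x y : Int) : Bool :=
  if x = 2 ∧ y ∈ ([1, 2, 3] : List Int) then true else false

-- inner `while True` loop of A: checks bomb_location, then i += 2, breaks when i >= N
def getFirstHitInner (N i j : Int) : Option (List Int) :=
  if bombLocation i j then some [i, j]
  else
    let i' := i + 2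
    if i' ≥ N then none
    else getFirstHitInner N i' j
termination_by (N - i).toNat
decreasing_by omega

-- outer `while j < N` loop of A
def getFirstHitOuter (N i0 j : Int) : Option (List Int) :=
  if _h : j < N then
    match getFirstHitInner N i0 j with
    | some r => some r
    | none => getFirstHitOuter N (PySem.Int.mod (i0 + 1) 3) (j + 1)
  else none
termination_by (N - j).toNat
decreasing_by omega

def getFirstHit (N : Int) : Option (List Int) :=
  getFirstHitOuter N 0 0

-- ===== PORT B =====
def getFirstHit_alt (N : Int) : Option (List Int) :=
  if N ≥ 3 then some [2, 2] else none

-- ===== PRECONDITION & SPEC =====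
def Spec_getFirstHit (N : Int) (out : Option (List Int)) : Prop := out = getFirstHit_alt N
instance (N : Int) (out : Option (List Int)) : Decidable (Spec_getFirstHit N out) := by unfold Spec_getFirstHit; infer_instance

-- ===== CLAIM (what is proved, stated in full; the proofs are below) =====
def Claim_equal_getFirstHit : Prop := ∀ (N : Int), Dom_getFirstHit N → Spec_getFirstHit N (getFirstHit N)

-- ===== LEMMAS AND PROOFS =====

-- the inner scan at column j = 0 never finds the bomb (y = 0 is not in [1,2,3])
theorem inner_j0 (N i : Int) : getFirstHitInner N i 0 = none := by
  fun_induction getFirstHitInner N i 0 with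
  | case1 a h => simp [bombLocation] at h
  | case2 => rfl
  | case3 a b c d ih => exact ih

-- the inner scan at column j = 1 starting on an odd row never reaches x = 2
theorem inner_j1 (N i : Int) : i % 2 = 1 → getFirstHitInner N i 1 = none := by
  fun_induction getFirstHitInner N i 1 with
  | case1 a h =>
    intro hodd
    simp [bombLocation] at h
    omega
  | case2 => intros; rfl
  | case3 a b c d ih => intro hodd; exact ih (by omega)

-- one step of the outer loop when the column scan misses
theorem outer_step (N i0 j : Int) (h : j < N) (hin : getFirstHitInner N i0 j = none) :
    getFirstHitOuter N i0 j = getFirstHitOuter N (PySem.Int.mod (i0 + 1) 3) (j + 1) := by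
  rw [getFirstHitOuter, dif_pos h, hin]

-- one step of the outer loop when the column scan hits
theorem outer_hit (N i0 j : Int) (r : List Int) (h : j < N)
    (hin : getFirstHitInner N i0 j = some r) :
    getFirstHitOuter N i0 j = some r := by
  rw [getFirstHitOuter, dif_pos h, hin]

-- ===== VERDICT (by name: the statement is the Claim_ definition above) =====
theorem getFirstHit_spec : Claim_equal_getFirstHit := by
  intro N _
  unfold Spec_getFirstHit getFirstHit getFirstHit_alt
  have m1 : PySem.Int.mod (0 + 1) 3 = 1 := by decide
  have m2 : PySem.Int.mod (1 + 1) 3 = 2 := by decide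
  by_cases h3 : N ≥ 3
  · have hin : getFirstHitInner N 2 2 = some [2, 2] := by
      rw [getFirstHitInner]; simp [bombLocation]
    rw [outer_step N 0 0 (by omega) (inner_j0 N 0), m1]
    show getFirstHitOuter N 1 1 = _
    rw [outer_step N 1 1 (by omega) (inner_j1 N 1 (by decide)), m2]
    show getFirstHitOuter N 2 2 = _
    rw [outer_hit N 2 2 [2, 2] (by omega) hin]
    simp [h3]
  · simp only [if_neg h3]
    by_cases h0 : N ≤ 0
    · rw [getFirstHitOuter, dif_neg (by omega)]
    · by_cases h1 : N = 1
      · subst h1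
        rw [outer_step 1 0 0 (by omega) (inner_j0 1 0), m1]
        show getFirstHitOuter 1 1 1 = _
        rw [getFirstHitOuter, dif_neg (by omega)]
      · have h2 : N = 2 := by omega
        subst h2
        rw [outer_step 2 0 0 (by omega) (inner_j0 2 0), m1]
        show getFirstHitOuter 2 1 1 = _
        rw [outer_step 2 1 1 (by omega) (inner_j1 2 1 (by decide)), m2]
        show getFirstHitOuter 2 2 2 = _
        rw [getFirstHitOuter, dif_neg (by omega)]
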